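-- pv_equiv track=rewrite | github.com/edukyumin/TIL-Today_I_Learn | 0205_문제풀이1/다솔이의다이아몬드장식_4751.py | diamond
-- ===== SOURCE A (Python) =====
-- def diamond(letter):
--     n = 4 * len(letter) +1
--     empty_list = [['.' for i in range(n)] for i in range(5)]
--     for i in range(5):
--         # 첫째줄, 다섯째줄
--         if i == 0 or i == 4:
--             for j in range(2, n, 4):
--                 empty_list[i][j] = '#'
--         #둘쨰줄, 넷째줄
--         if i ==1 or i ==3:
--             for j in range(1, n, 2):
--                 empty_list[i][j] = '#'
--
--         #셋째줄
--         if i ==2: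
--             for j in range(0,n,4):
--                 empty_list[i][j] = '#'
--
--             for j in range(2, n, 4):
--                 z= (j-2)//4
--                 empty_list[i][j] = letter[z]
--     my_str = ''
--     for k in empty_list:
--         my_str += ''.join(k) +'\n'
--
--     return my_str[:-1]
-- ===== SOURCE B (Python) =====
-- def diamond(letter):
--     top = "..#." * len(letter) + "."
--     sec = ".#.#" * len(letter) + "."
--     mid = "".join("#." + c + "." for c in letter) + "#"
--     return "\n".join([top, sec, mid, sec, top])
-- ===== Notes on version B (the rewrite author's own statement) =====
-- stated objective: simpler
-- what changed: B builds the five row strings directly by string repetition and a per-letter comprehension and joins them with newline, instead of allocating a 5 x n character grid and mutating cells with stepped index loops.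
import Mathlib
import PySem

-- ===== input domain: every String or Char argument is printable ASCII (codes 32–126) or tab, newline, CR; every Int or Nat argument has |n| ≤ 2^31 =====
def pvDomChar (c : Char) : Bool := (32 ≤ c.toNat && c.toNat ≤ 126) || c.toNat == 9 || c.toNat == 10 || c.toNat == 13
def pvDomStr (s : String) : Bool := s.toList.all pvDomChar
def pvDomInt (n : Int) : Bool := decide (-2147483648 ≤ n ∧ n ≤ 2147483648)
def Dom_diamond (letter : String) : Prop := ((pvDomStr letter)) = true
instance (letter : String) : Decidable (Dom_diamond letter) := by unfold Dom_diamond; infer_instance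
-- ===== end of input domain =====

-- B replaces A's 5×n mutable character grid (filled by stepped index loops) with direct
-- construction of the five row strings by repetition/tiling, joined with '\n' (objective: simpler).

-- ===== PORT A =====
-- Python strings are modelled as List Char (PySem's model); ''.join over a row of
-- 1-character strings is the row itself, '+= … + "\n"' appends, my_str[:-1] is slice.
def diamond (letter : String) : String :=
  let n : Int := 4 * PySem.Str.len letter + 1
  let empty_list : List (List Char) :=
    (PySem.List.pyRange 0 5 1).map (fun _ => (PySem.List.pyRange 0 n 1).map (fun _ => '.'))
  let grid := (PySem.List.pyRange 0 5 1).foldl (fun g i =>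
    let g := if i = 0 ∨ i = 4 then
        g.set i.toNat ((PySem.List.pyRange 2 n 4).foldl
          (fun r j => r.set j.toNat '#') (g.getD i.toNat []))
      else g
    let g := if i = 1 ∨ i = 3 then
        g.set i.toNat ((PySem.List.pyRange 1 n 2).foldl
          (fun r j => r.set j.toNat '#') (g.getD i.toNat []))
      else g
    let g := if i = 2 then
        let r := (PySem.List.pyRange 0 n 4).foldl
          (fun r j => r.set j.toNat '#') (g.getD i.toNat [])
        let r := (PySem.List.pyRange 2 n 4).foldl
          (fun r j =>
            let z := PySem.Int.floordiv (j - 2) 4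
            -- letter[z]: z is always in range on this loop, the default is never used
            r.set j.toNat ((PySem.Str.pyGet? letter z).getD ' ')) r
        g.set i.toNat r
      else g
    g) empty_list
  let my_str : List Char := grid.foldl (fun s k => s ++ k ++ ['\n']) []
  String.ofList (PySem.List.slice my_str none (some (-1)))

-- ===== PORT B =====
-- '"..#." * len(letter)' is pyRepeat; '"".join(…)' of the per-letter pieces is flatten.
def diamond_alt (letter : String) : String :=
  let top := PySem.List.pyRepeat ['.', '.', '#', '.'] (PySem.Str.len letter) ++ ['.']
  let sec := PySem.List.pyRepeat ['.', '#', '.', '#'] (PySem.Str.len letter) ++ ['.']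
  let mid := (letter.toList.map (fun c => ['#', '.'] ++ [c] ++ ['.'])).flatten ++ ['#']
  String.ofList (PySem.Chars.join ['\n'] [top, sec, mid, sec, top])

-- ===== PRECONDITION & SPEC =====
def Spec_diamond (letter : String) (out : String) : Prop := out = diamond_alt letter
instance (letter : String) (out : String) : Decidable (Spec_diamond letter out) := by unfold Spec_diamond; infer_instance

-- ===== CLAIM (what is proved, stated in full; the proofs are below) =====
def Claim_equal_diamond : Prop := ∀ (letter : String), Dom_diamond letter → Spec_diamond letter (diamond letter)

-- ===== LEMMAS AND PROOFS =====

-- a stepped index-assignment loop: for k in range(L): row[g k] = w k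
def pvRow (g : Nat → Nat) (w : Nat → Char) (L : Nat) (base : List Char) : List Char :=
  (List.range L).foldl (fun r k => r.set (g k) (w k)) base

lemma pvRow_succ (g : Nat → Nat) (w : Nat → Char) (L : Nat) (base : List Char) :
    pvRow g w (L+1) base = (pvRow g w L base).set (g L) (w L) := by
  simp [pvRow, List.range_succ]

lemma pvRow_length (g : Nat → Nat) (w : Nat → Char) (L : Nat) (base : List Char) :
    (pvRow g w L base).length = base.length := by
  induction L with
  | zero => rfl
  | succ L ih => simp [pvRow_succ, ih]

lemma pvRow_append (g : Nat → Nat) (w : Nat → Char) (L : Nat) (base ys : List Char)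
    (h : ∀ k, k < L → g k < base.length) :
    pvRow g w L (base ++ ys) = pvRow g w L base ++ ys := by
  induction L with
  | zero => rfl
  | succ L ih =>
    rw [pvRow_succ, pvRow_succ, ih (fun k hk => h k (by omega)), List.set_append]
    rw [if_pos (by rw [pvRow_length]; exact h L (by omega))]

def tileD (p : List Char) (L : Nat) : List Char := (List.replicate L p).flatten

lemma tileD_succ (p : List Char) (L : Nat) : tileD p (L+1) = tileD p L ++ p := by
  simp [tileD, List.replicate_succ']

lemma tileD_length (p : List Char) (L : Nat) : (tileD p L).length = L * p.length := by
  induction L with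
  | zero => simp [tileD]
  | succ L ih => rw [tileD_succ]; simp [ih]; ring

lemma set_append_right' (xs ys : List Char) (i : Nat) (c : Char) (h : xs.length <= i) :
    (xs ++ ys).set i c = xs ++ ys.set (i - xs.length) c := by
  rw [List.set_append, if_neg (by omega)]

lemma row0_lemma (L : Nat) :
    pvRow (fun k => 2 + 4*k) (fun _ => '#') L (List.replicate (4*L+1) '.')
      = tileD ['.', '.', '#', '.'] L ++ ['.'] := by
  induction L with
  | zero => rfl
  | succ L ih =>
    have hrep : List.replicate (4*(L+1)+1) '.' = List.replicate (4*L+1) '.' ++ List.replicate 4 '.' := by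
      rw [show 4*(L+1)+1 = (4*L+1)+4 from by omega, List.replicate_add]
    have hl : (tileD ['.', '.', '#', '.'] L).length = 4*L := by rw [tileD_length]; simp; omega
    rw [pvRow_succ, hrep, pvRow_append _ _ _ _ _ (fun k hk => by simp; omega), ih,
      List.append_assoc, set_append_right' _ _ _ _ (by rw [hl]; omega), hl,
      show 2 + 4*L - (4*L) = 2 from by omega, tileD_succ, List.append_assoc]
    congr 1

lemma row1_lemma (L : Nat) :
    pvRow (fun k => 1 + 2*k) (fun _ => '#') (2*L) (List.replicate (4*L+1) '.')
      = tileD ['.', '#', '.', '#'] L ++ ['.'] := by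
  induction L with
  | zero => rfl
  | succ L ih =>
    have hrep : List.replicate (4*(L+1)+1) '.' = List.replicate (4*L+1) '.' ++ List.replicate 4 '.' := by
      rw [show 4*(L+1)+1 = (4*L+1)+4 from by omega, List.replicate_add]
    have hl : (tileD ['.', '#', '.', '#'] L).length = 4*L := by rw [tileD_length]; simp; omega
    rw [show 2*(L+1) = (2*L + 1) + 1 from by ring, pvRow_succ, pvRow_succ, hrep,
      pvRow_append _ _ _ _ _ (fun k hk => by simp; omega), ih,
      List.append_assoc, set_append_right' _ _ _ _ (by rw [hl]; omega),
      set_append_right' _ _ _ _ (by rw [hl]; omega), hl,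
      show 1 + 2*(2*L) - (4*L) = 1 from by omega,
      show 1 + 2*(2*L+1) - (4*L) = 3 from by omega, tileD_succ, List.append_assoc]
    congr 1

lemma row2a_lemma (L : Nat) :
    pvRow (fun k => 4*k) (fun _ => '#') (L+1) (List.replicate (4*L+1) '.')
      = tileD ['#', '.', '.', '.'] L ++ ['#'] := by
  induction L with
  | zero => rfl
  | succ L ih =>
    have hrep : List.replicate (4*(L+1)+1) '.' = List.replicate (4*L+1) '.' ++ List.replicate 4 '.' := by
      rw [show 4*(L+1)+1 = (4*L+1)+4 from by omega, List.replicate_add]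
    have hl : (tileD ['#', '.', '.', '.'] L).length = 4*L := by rw [tileD_length]; simp; omega
    rw [pvRow_succ, hrep, pvRow_append _ _ _ _ _ (fun k hk => by simp; omega), ih,
      List.append_assoc, set_append_right' _ _ _ _ (by rw [hl]; omega), hl,
      show 4*(L+1) - (4*L) = 4 from by omega, tileD_succ, List.append_assoc]
    congr 1

-- the middle row's per-letter tiling, as B builds it
def pvMid (l : List Char) : List Char := (l.map (fun c => ['#', '.'] ++ [c] ++ ['.'])).flatten

lemma pvMid_append (l : List Char) (c : Char) :
    pvMid (l ++ [c]) = pvMid l ++ ['#', '.', c, '.'] := by simp [pvMid]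

lemma pvMid_length (l : List Char) : (pvMid l).length = 4*l.length := by
  induction l with
  | nil => rfl
  | cons x xs ih =>
    rw [show pvMid (x :: xs) = (['#', '.'] ++ [x] ++ ['.']) ++ pvMid xs from rfl,
      List.length_append, ih]
    simp; omega

lemma row2b_lemma (l : List Char) (w : Nat → Char)
    (hw : ∀ k (h : k < l.length), w k = l[k]) :
    pvRow (fun k => 2 + 4*k) w l.length (tileD ['#', '.', '.', '.'] l.length ++ ['#'])
      = pvMid l ++ ['#'] := by
  induction l using List.reverseRecOn with
  | nil => rfl
  | append_singleton l c ih =>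
    have hbase : tileD ['#', '.', '.', '.'] (l.length + 1) ++ ['#']
        = (tileD ['#', '.', '.', '.'] l.length ++ ['#']) ++ ['.', '.', '.', '#'] := by
      rw [tileD_succ]; simp
    have hw2 : w l.length = c := by
      rw [hw l.length (by simp), List.getElem_append_right (by omega)]
      simp
    rw [show (l ++ [c]).length = l.length + 1 from by simp, pvRow_succ, hbase,
      pvRow_append _ _ _ _ _ (fun k hk => by
        rw [List.length_append, tileD_length]; simp; omega),
      ih (fun k hk => by
        rw [hw k (by simp; omega), List.getElem_append_left]),
      List.append_assoc, set_append_right' _ _ _ _ (by rw [pvMid_length]; omega),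
      pvMid_length, show 2 + 4*l.length - (4*l.length) = 2 from by omega, hw2,
      pvMid_append, List.append_assoc]
    congr 1

-- converting A's stepped pyRanges with bound n = 4*L+1 into pvRow folds
lemma pyRange_2_4 (L : Nat) : PySem.List.pyRange 2 (4*(L:Int)+1) 4
    = (List.range L).map (fun (k:Nat) => 2 + 4*(k:Int)) := by
  have hc : (if (2:Int) < 4*(L:Int)+1 then ((4*(L:Int)+1 - 2 + 4 - 1)/4).toNat else 0) = L := by
    split <;> omega
  rw [PySem.List.pyRange_of_pos 2 (4*(L:Int)+1) (by norm_num), hc]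

lemma pyRange_1_2 (L : Nat) : PySem.List.pyRange 1 (4*(L:Int)+1) 2
    = (List.range (2*L)).map (fun (k:Nat) => 1 + 2*(k:Int)) := by
  have hc : (if (1:Int) < 4*(L:Int)+1 then ((4*(L:Int)+1 - 1 + 2 - 1)/2).toNat else 0) = 2*L := by
    split <;> omega
  rw [PySem.List.pyRange_of_pos 1 (4*(L:Int)+1) (by norm_num), hc]

lemma pyRange_0_4 (L : Nat) : PySem.List.pyRange 0 (4*(L:Int)+1) 4
    = (List.range (L+1)).map (fun (k:Nat) => 0 + 4*(k:Int)) := by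
  have hc : (if (0:Int) < 4*(L:Int)+1 then ((4*(L:Int)+1 - 0 + 4 - 1)/4).toNat else 0) = L+1 := by
    split <;> omega
  rw [PySem.List.pyRange_of_pos 0 (4*(L:Int)+1) (by norm_num), hc]

lemma row_dots (L : Nat) : ((PySem.List.pyRange 0 (4*(L:Int)+1) 1).map (fun _ => '.'))
    = List.replicate (4*L+1) '.' := by
  rw [PySem.List.pyRange_one, List.map_map]
  rw [show ((fun (_ : Int) => '.') ∘ (fun (k : Nat) => (0:Int) + ↑k)) = (fun (_ : Nat) => '.') from rfl]
  rw [List.map_const', List.length_range]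
  congr 1

lemma fold_2_4 (L : Nat) (base : List Char) :
    (PySem.List.pyRange 2 (4*(L:Int)+1) 4).foldl (fun r j => r.set j.toNat '#') base
      = pvRow (fun k => 2 + 4*k) (fun _ => '#') L base := by
  rw [pyRange_2_4, List.foldl_map]
  exact PySem.List.foldl_congr_mem _ _ _ _ (fun acc k _ => by
    rw [show ((2:Int) + 4*(k:Int)).toNat = 2 + 4*k from by omega])

lemma fold_1_2 (L : Nat) (base : List Char) :
    (PySem.List.pyRange 1 (4*(L:Int)+1) 2).foldl (fun r j => r.set j.toNat '#') base
      = pvRow (fun k => 1 + 2*k) (fun _ => '#') (2*L) base := by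
  rw [pyRange_1_2, List.foldl_map]
  exact PySem.List.foldl_congr_mem _ _ _ _ (fun acc k _ => by
    rw [show ((1:Int) + 2*(k:Int)).toNat = 1 + 2*k from by omega])

lemma fold_0_4 (L : Nat) (base : List Char) :
    (PySem.List.pyRange 0 (4*(L:Int)+1) 4).foldl (fun r j => r.set j.toNat '#') base
      = pvRow (fun k => 4*k) (fun _ => '#') (L+1) base := by
  rw [pyRange_0_4, List.foldl_map]
  exact PySem.List.foldl_congr_mem _ _ _ _ (fun acc k _ => by
    rw [show ((0:Int) + 4*(k:Int)).toNat = 4*k from by omega])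

lemma fold_letter (letter : String) (base : List Char) :
    (PySem.List.pyRange 2 (4*(letter.toList.length:Int)+1) 4).foldl
        (fun r j => r.set j.toNat ((PySem.Str.pyGet? letter (PySem.Int.floordiv (j - 2) 4)).getD ' ')) base
      = pvRow (fun k => 2 + 4*k) (fun k => (letter.toList[k]?).getD ' ') letter.toList.length base := by
  rw [pyRange_2_4, List.foldl_map]
  exact PySem.List.foldl_congr_mem _ _ _ _ (fun acc k _ => by
    show acc.set ((2 + 4*(k:Int)).toNat)
        ((PySem.Str.pyGet? letter (PySem.Int.floordiv (2 + 4*(k:Int) - 2) 4)).getD ' ') = _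
    rw [show (2 + 4*(k:Int) - 2) = 4*(k:Int) from by ring,
      PySem.Int.floordiv_eq_ediv_of_pos (by norm_num),
      Int.mul_ediv_cancel_left _ (by norm_num),
      PySem.Str.pyGet?_natCast,
      show ((2:Int) + 4*(k:Int)).toNat = 2 + 4*k from by omega])

-- literal 5-row grid reductions (all rfl)
lemma getD5_0 (a b c d e : List Char) : [a,b,c,d,e].getD 0 [] = a := rfl
lemma getD5_1 (a b c d e : List Char) : [a,b,c,d,e].getD 1 [] = b := rfl
lemma getD5_2 (a b c d e : List Char) : [a,b,c,d,e].getD 2 [] = c := rfl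
lemma getD5_3 (a b c d e : List Char) : [a,b,c,d,e].getD 3 [] = d := rfl
lemma getD5_4 (a b c d e : List Char) : [a,b,c,d,e].getD 4 [] = e := rfl
lemma set5_0 (a b c d e v : List Char) : [a,b,c,d,e].set 0 v = [v,b,c,d,e] := rfl
lemma set5_1 (a b c d e v : List Char) : [a,b,c,d,e].set 1 v = [a,v,c,d,e] := rfl
lemma set5_2 (a b c d e v : List Char) : [a,b,c,d,e].set 2 v = [a,b,v,d,e] := rfl
lemma set5_3 (a b c d e v : List Char) : [a,b,c,d,e].set 3 v = [a,b,c,v,e] := rfl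
lemma set5_4 (a b c d e v : List Char) : [a,b,c,d,e].set 4 v = [a,b,c,d,v] := rfl

lemma pyRepeat_cast (p : List Char) (L : Nat) :
    PySem.List.pyRepeat p ((L:Nat):Int) = tileD p L := by
  simp [PySem.List.pyRepeat, tileD]

-- ===== VERDICT (by name: the statement is the Claim_ definition above) =====
theorem diamond_spec : Claim_equal_diamond := by
  intro letter _
  show diamond letter = diamond_alt letter
  have h05 : PySem.List.pyRange 0 5 1 = [0,1,2,3,4] := by decide
  simp only [diamond, diamond_alt, h05, PySem.Str.len_eq, List.map_cons, List.map_nil,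
    List.foldl_cons, List.foldl_nil, Int.reduceEq, or_false, false_or, or_self, reduceIte,
    Int.reduceToNat, row_dots, fold_2_4, fold_1_2, fold_0_4, fold_letter, pyRepeat_cast,
    getD5_0, getD5_1, getD5_2, getD5_3, getD5_4,
    set5_0, set5_1, set5_2, set5_3, set5_4, row0_lemma, row1_lemma, row2a_lemma]
  rw [row2b_lemma letter.toList _ (fun k hk => by simp [List.getElem?_eq_getElem hk])]
  simp only [List.nil_append]
  rw [PySem.List.slice_to_neg_one]
  rw [show ∀ (x y z u v : List Char), x ++ ['\n'] ++ y ++ ['\n'] ++ z ++ ['\n'] ++ u ++ ['\n'] ++ v ++ ['\n']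
      = (x ++ ['\n'] ++ y ++ ['\n'] ++ z ++ ['\n'] ++ u ++ ['\n'] ++ v) ++ ['\n']
    from fun x y z u v => by simp [List.append_assoc]]
  rw [List.dropLast_concat]
  rw [PySem.Chars.join_cons_cons, PySem.Chars.join_cons_cons, PySem.Chars.join_cons_cons,
    PySem.Chars.join_cons_cons, PySem.Chars.join_singleton]
  simp only [pvMid, List.append_assoc]
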